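-- pv_equiv track=rewrite | github.com/banditburai/yoga-python | tests/test_intrinsic_size.py | longest_word_width
-- ===== SOURCE A (Python) =====
-- def longest_word_width(text, width_per_char=10):
--     max_length = 0
--     current_length = 0
--     for c in text:
--         if c == " ":
--             max_length = max(current_length, max_length)
--             current_length = 0
--         else:
--             current_length += 1
--     return max(current_length, max_length) * width_per_char
-- ===== SOURCE B (Python) =====
-- def longest_word_width(text, width_per_char=10):
--     return max(len(w) for w in text.split(" ")) * width_per_char
-- ===== Notes on version B (the rewrite author's own statement) =====
-- stated objective: idiomatic
-- what changed: B tokenizes the whole string with str.split on a single space and takes max(len(w)) over the word list, instead of A's inline character scan maintaining a running current_length.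
import Mathlib
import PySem

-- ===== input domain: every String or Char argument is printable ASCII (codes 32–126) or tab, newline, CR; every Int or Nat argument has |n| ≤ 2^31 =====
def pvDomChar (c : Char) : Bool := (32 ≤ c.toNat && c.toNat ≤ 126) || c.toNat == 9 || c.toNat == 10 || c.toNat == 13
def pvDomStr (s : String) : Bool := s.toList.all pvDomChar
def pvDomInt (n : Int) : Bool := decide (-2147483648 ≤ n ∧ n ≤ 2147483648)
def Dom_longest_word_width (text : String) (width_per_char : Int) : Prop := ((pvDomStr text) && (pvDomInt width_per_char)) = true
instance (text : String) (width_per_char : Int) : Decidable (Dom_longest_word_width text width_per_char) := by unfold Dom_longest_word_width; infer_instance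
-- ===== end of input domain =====

-- B: idiomatic re-implementation — tokenize with text.split(" ") and take the max word length,
-- instead of A's inline character scan with a running current_length.

-- ===== PORT A =====
-- the loop body: on ' ' fold current into max and reset, else count the character
def lwwStep (p : Int × Int) (c : Char) : Int × Int :=
  if c == ' ' then (max p.2 p.1, 0) else (p.1, p.2 + 1)

-- literal port: for c in text, state (max_length, current_length)
def longest_word_width (text : String) (width_per_char : Int) : Int :=
  let st := text.toList.foldl lwwStep (0, 0)
  max st.2 st.1 * width_per_char

-- ===== PORT B =====
-- text.split(" ") with a single-character separator is exactly List.splitOn ' ' on the code points;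
-- max(len(w) for w in words) is the fold of max over the (nonempty) word list.
def longest_word_width_alt (text : String) (width_per_char : Int) : Int :=
  match List.splitOn ' ' text.toList with
  | [] => 0  -- unreachable: split always returns a non-empty list
  | w0 :: rest =>
    rest.foldl (fun acc w => max acc (w.length : Int)) ((w0.length : Int)) * width_per_char

-- ===== PRECONDITION & SPEC =====
def Spec_longest_word_width (text : String) (width_per_char : Int) (out : Int) : Prop := out = longest_word_width_alt text width_per_char
instance (text : String) (width_per_char : Int) (out : Int) : Decidable (Spec_longest_word_width text width_per_char out) := by unfold Spec_longest_word_width; infer_instance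

-- ===== CLAIM (what is proved, stated in full; the proofs are below) =====
def Claim_equal_longest_word_width : Prop := ∀ (text : String) (width_per_char : Int), Dom_longest_word_width text width_per_char → Spec_longest_word_width text width_per_char (longest_word_width text width_per_char)

-- ===== LEMMAS AND PROOFS =====

-- "max over the word list, with c added to the first word's length"
def lwwBest (c : Int) : List (List Char) → Int
  | [] => c
  | w0 :: rest => rest.foldl (fun acc w => max acc (w.length : Int)) (c + w0.length)

theorem foldl_max_max (f : List Char → Int) (l : List (List Char)) (a b : Int) :
    l.foldl (fun acc w => max acc (f w)) (max a b)
      = max a (l.foldl (fun acc w => max acc (f w)) b) := by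
  induction l generalizing b with
  | nil => rfl
  | cons w l ih =>
      simp only [List.foldl_cons, max_assoc]
      exact ih (max b (f w))

theorem le_foldl_max (f : List Char → Int) (l : List (List Char)) (b : Int) :
    b ≤ l.foldl (fun acc w => max acc (f w)) b := by
  induction l generalizing b with
  | nil => exact le_refl _
  | cons w l ih =>
      exact le_trans (le_max_left b (f w)) (ih _)

theorem lwwScan_eq_best (cs : List Char) :
    ∀ m c : Int,
      max (cs.foldl lwwStep (m, c)).2 (cs.foldl lwwStep (m, c)).1
        = max m (lwwBest c (List.splitOnP (fun x => x == ' ') cs)) := by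
  induction cs with
  | nil =>
      intro m c
      simp [List.splitOnP_nil, lwwBest, max_comm]
  | cons a cs ih =>
      intro m c
      obtain ⟨w0, rest, hsplit⟩ :
          ∃ w0 rest, List.splitOnP (fun x => x == ' ') cs = w0 :: rest := by
        cases hs : List.splitOnP (fun x => x == ' ') cs with
        | nil => exact absurd hs (List.splitOnP_ne_nil _ _)
        | cons w0 rest => exact ⟨w0, rest, rfl⟩
      by_cases ha : a = ' '
      · subst ha
        have hstep : lwwStep (m, c) ' ' = (max c m, 0) := rfl
        rw [List.foldl_cons, hstep, ih (max c m) 0, List.splitOnP_cons]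
        simp only [beq_self_eq_true, if_true, hsplit, lwwBest, List.foldl_cons,
          List.length_nil, Nat.cast_zero, add_zero, zero_add]
        rw [foldl_max_max (fun w => (w.length : Int)) rest c (w0.length : Int)]
        omega
      · have hb : (a == ' ') = false := by simpa using ha
        have hstep : lwwStep (m, c) a = (m, c + 1) := by simp [lwwStep, hb]
        rw [List.foldl_cons, hstep, ih m (c + 1), List.splitOnP_cons, hb]
        simp only [if_neg Bool.false_ne_true, hsplit, List.modifyHead, lwwBest,
          List.length_cons]
        congr 2
        push_cast
        ring

-- ===== VERDICT (by name: the statement is the Claim_ definition above) =====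
theorem longest_word_width_spec : Claim_equal_longest_word_width := by
  intro text width_per_char _
  unfold Spec_longest_word_width
  simp only [longest_word_width, longest_word_width_alt]
  rw [lwwScan_eq_best text.toList 0 0]
  unfold List.splitOn
  obtain ⟨w0, rest, hsplit⟩ :
      ∃ w0 rest, List.splitOnP (fun x => x == ' ') text.toList = w0 :: rest := by
    cases hs : List.splitOnP (fun x => x == ' ') text.toList with
    | nil => exact absurd hs (List.splitOnP_ne_nil _ _)
    | cons w0 rest => exact ⟨w0, rest, rfl⟩
  rw [hsplit]
  simp only [lwwBest, zero_add]
  have hnn : (0 : Int) ≤ rest.foldl (fun acc w => max acc (w.length : Int)) (w0.length : Int) :=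
    le_trans (Int.natCast_nonneg _) (le_foldl_max _ rest _)
  rw [max_eq_right hnn]
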